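-- pv_equiv track=rewrite | github.com/zimmerman-team/dx.backend | services/external_sources/util.py | list_shuffle_sorted
-- ===== SOURCE A (Python) =====
-- def list_shuffle_sorted(results_list, limit):
--     """
--     Results_list is a list of lists. Convert it to a single list,
--     where we take the n-th item of each sublist.
--     [[1,5,9,13,15], [2,6,10,14], [3,7,11], [4,8,12]] will be
--     converted to [1,2,3,4,5,6,7,8,9,10,11,12,13,14,15]
--
--     :param results_list: A list of lists
--     :param limit: The maximum number of results per source
--     """
--     try:
--         results = []
--         for i in range(limit):
--             for result in results_list:
--                 if len(result) > i:
--                     results.append(result[i])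
--         return results
--     except Exception:
--         return []
-- ===== SOURCE B (Python) =====
-- def list_shuffle_sorted(results_list, limit):
--     """Single row-major pass: bucket every value by its column index, then
--     emit the buckets for columns 0..limit-1 in order."""
--     try:
--         pairs = [(i, v) for row in results_list for i, v in enumerate(row)]
--         buckets = {}
--         for i, v in pairs:
--             buckets.setdefault(i, []).append(v)
--         out = []
--         for i in range(limit):
--             out += buckets.get(i, [])
--         return out
--     except Exception:
--         return []
-- ===== Notes on version B (the rewrite author's own statement) =====
-- stated objective: faster
-- what changed: A rescans the whole results_list once per column (limit full passes); B does one row-major pass that buckets every value by its column index into a dict and then concatenates the buckets for columns 0..limit-1.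
import Mathlib
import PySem

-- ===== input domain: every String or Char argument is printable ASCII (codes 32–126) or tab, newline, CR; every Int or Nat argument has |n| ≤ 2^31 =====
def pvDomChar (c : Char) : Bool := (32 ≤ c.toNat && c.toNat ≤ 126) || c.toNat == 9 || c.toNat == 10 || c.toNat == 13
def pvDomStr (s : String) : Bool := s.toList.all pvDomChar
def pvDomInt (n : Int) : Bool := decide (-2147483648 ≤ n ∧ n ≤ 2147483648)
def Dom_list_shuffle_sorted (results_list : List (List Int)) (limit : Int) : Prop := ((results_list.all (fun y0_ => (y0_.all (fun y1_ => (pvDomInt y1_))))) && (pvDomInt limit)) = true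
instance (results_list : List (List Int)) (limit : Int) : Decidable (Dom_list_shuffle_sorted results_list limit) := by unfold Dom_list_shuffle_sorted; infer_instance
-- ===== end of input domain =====

-- B replaces A's column-by-column rescans with one row-major bucketing pass; alternative decomposition, same result.

-- ===== PORT A =====
-- A: for i in range(limit): for result in results_list: if len(result) > i: results.append(result[i])
-- (the guard len(result) > i with i ≥ 0 makes result[i] in range, so pyGetD is exact here)
def list_shuffle_sorted (results_list : List (List Int)) (limit : Int) : List Int :=
  (PySem.List.pyRange 0 limit 1).foldl
    (fun results i =>
      results_list.foldl
        (fun results result =>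
          if (result.length : Int) > i then results ++ [PySem.List.pyGetD result i 0] else results)
        results)
    []

-- ===== PORT B =====
-- B: pairs = [(i,v) for row in results_list for i,v in enumerate(row)];
--    bucket each pair by column; out += buckets.get(i, []) for i in range(limit)
def list_shuffle_sorted_alt (results_list : List (List Int)) (limit : Int) : List Int :=
  let pairs := results_list.flatMap (fun row => PySem.List.enumerate row 0)
  let buckets := pairs.foldl (fun d p => d.modify p.1 [] (· ++ [p.2])) PySem.Dict.empty
  (PySem.List.pyRange 0 limit 1).foldl (fun out i => out ++ buckets.getD i []) []

-- ===== PRECONDITION & SPEC =====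
def Spec_list_shuffle_sorted (results_list : List (List Int)) (limit : Int) (out : List Int) : Prop := out = list_shuffle_sorted_alt results_list limit
instance (results_list : List (List Int)) (limit : Int) (out : List Int) : Decidable (Spec_list_shuffle_sorted results_list limit out) := by unfold Spec_list_shuffle_sorted; infer_instance

-- ===== CLAIM (what is proved, stated in full; the proofs are below) =====
def Claim_equal_list_shuffle_sorted : Prop := ∀ (results_list : List (List Int)) (limit : Int), Dom_list_shuffle_sorted results_list limit → Spec_list_shuffle_sorted results_list limit (list_shuffle_sorted results_list limit)

-- ===== LEMMAS AND PROOFS =====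

-- filtering the enumeration of one row at column i keeps exactly row[i] (when in range)
lemma enumerate_filter_eq (row : List Int) (s i : Int) :
    ((PySem.List.enumerate row s).filter (fun p => p.1 == i)).map (·.2)
      = if s ≤ i ∧ i < s + row.length then [PySem.List.pyGetD row (i - s) 0] else [] := by
  induction row generalizing s with
  | nil => simp [PySem.List.enumerate]
  | cons x xs ih =>
      rw [PySem.List.enumerate_cons]
      by_cases hsi : s = i
      · subst hsi
        have hfilt : (PySem.List.enumerate xs (s + 1)).filter (fun p => p.1 == s) = [] := by
          apply List.filter_eq_nil_iff.mpr
          intro p hp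
          have : p.1 ∈ (PySem.List.enumerate xs (s + 1)).map (·.1) := List.mem_map_of_mem hp
          rw [PySem.List.map_fst_enumerate, PySem.List.mem_pyRange_one] at this
          simp; omega
        simp [hfilt, PySem.List.pyGetD_zero_cons]
      · rw [List.filter_cons]
        simp only [show (((s, x) : Int × Int).1 == i) = false by simpa using hsi, if_false,
          Bool.false_eq_true]
        rw [ih (s + 1)]
        by_cases hin : s + 1 ≤ i ∧ i < s + 1 + xs.length
        · rw [if_pos hin, if_pos (by simp only [List.length_cons] at *; push_cast at *; omega)]
          congr 1
          have h2 : i - (s + 1) = (((i - (s + 1)).toNat : Nat) : Int) := by omega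
          have h3 : i - s = ((((i - (s + 1)).toNat + 1 : Nat)) : Int) := by omega
          rw [h2, h3, PySem.List.pyGetD_natCast, PySem.List.pyGetD_natCast, List.getD_cons_succ]
        · rw [if_neg hin, if_neg (by simp only [List.length_cons] at *; push_cast at *; omega)]

-- the bucket for column i is exactly A's inner pass over results_list
lemma bucket_eq (results_list : List (List Int)) (i : Int) (hi : 0 ≤ i) :
    ((results_list.flatMap (fun row => PySem.List.enumerate row 0)).foldl
        (fun d p => d.modify p.1 [] (· ++ [p.2])) PySem.Dict.empty).getD i []
      = results_list.flatMap
          (fun result => if (result.length : Int) > i then [PySem.List.pyGetD result i 0] else []) := by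
  rw [PySem.Dict.getD_foldl_modify_append]
  simp only [PySem.Dict.getD_empty, List.nil_append]
  rw [List.filter_flatMap, List.map_flatMap]
  apply List.flatMap_congr  -- pointwise
  intro row _
  rw [enumerate_filter_eq]
  simp only [sub_zero, zero_add]
  congr 1
  simp only [eq_iff_iff, gt_iff_lt]
  exact ⟨fun h => h.2, fun h => ⟨hi, h⟩⟩

-- ===== VERDICT (by name: the statement is the Claim_ definition above) =====
theorem list_shuffle_sorted_spec : Claim_equal_list_shuffle_sorted := by
  intro results_list limit _
  unfold Spec_list_shuffle_sorted list_shuffle_sorted list_shuffle_sorted_alt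
  apply PySem.List.foldl_congr_mem
  intro acc i hi
  have hi0 : 0 ≤ i := (PySem.List.mem_pyRange_one.mp hi).1
  have hbody : results_list.foldl
      (fun results result =>
        if (result.length : Int) > i then results ++ [PySem.List.pyGetD result i 0] else results) acc
    = results_list.foldl
      (fun results result =>
        results ++ (if (result.length : Int) > i then [PySem.List.pyGetD result i 0] else [])) acc := by
    apply PySem.List.foldl_congr_mem
    intro a r _
    split <;> simp
  rw [hbody, PySem.List.foldl_append_eq_flatMap, bucket_eq results_list i hi0]
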